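-- pv_equiv track=rewrite | github.com/camvassallo/gravity | score_bracket.py | actual_winners_per_round
-- ===== SOURCE A (Python) =====
-- ROUND_ORDER = {"R64": 0, "R32": 1, "S16": 2, "E8": 3, "F4": 4, "Championship": 5, "Champion": 6}
--
-- def actual_winners_per_round(actual: dict, bracket: dict) -> dict[str, list[str]]:
--     """Determine actual winners for each round based on furthest advancement."""
--     winners = {}
--     for round_name in ["R32", "S16", "E8", "F4", "Championship", "Champion"]:
--         round_idx = ROUND_ORDER[round_name]
--         winners[round_name] = [
--             team for team, furthest in actual.items()
--             if ROUND_ORDER.get(furthest, 0) >= round_idx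
--         ]
--     return winners
-- ===== SOURCE B (Python) =====
-- ROUND_ORDER = {"R64": 0, "R32": 1, "S16": 2, "E8": 3, "F4": 4, "Championship": 5, "Champion": 6}
-- ROUNDS = ["R32", "S16", "E8", "F4", "Championship", "Champion"]
--
--
-- def _merge(a, b):
--     """Merge two lists of (position, team) pairs, each sorted by position."""
--     out = []
--     i = j = 0
--     while i < len(a) and j < len(b):
--         if a[i][0] <= b[j][0]:
--             out.append(a[i])
--             i += 1
--         else:
--             out.append(b[j])
--             j += 1
--     out.extend(a[i:])
--     out.extend(b[j:])
--     return out
--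
--
-- def actual_winners_per_round(actual: dict, bracket: dict) -> dict[str, list[str]]:
--     """Bucket each team once by its exact furthest rank, then build the rounds
--     back-to-front: each round's list is the previous (deeper) round's list
--     merged by original position with the bucket of teams eliminated exactly there."""
--     buckets = {k: [] for k in range(1, 7)}
--     for i, (team, furthest) in enumerate(actual.items()):
--         r = ROUND_ORDER.get(furthest, 0)
--         if r >= 1:
--             buckets[r].append((i, team))
--     acc = []
--     results = {}
--     for k in range(6, 0, -1):
--         acc = _merge(buckets[k], acc)
--         results[ROUNDS[k - 1]] = [team for _, team in acc]
--     return {rn: results[rn] for rn in ROUNDS}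
-- ===== Notes on version B (the rewrite author's own statement) =====
-- stated objective: alternative
-- what changed: B replaces A's six filtering re-scans of all teams with a bucket-then-merge scheme: one pass buckets each team (with its position) by its exact furthest rank, then the six round lists are built back-to-front, each by a positional merge of the deeper round's list with the bucket of teams eliminated exactly at that round.
import Mathlib
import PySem

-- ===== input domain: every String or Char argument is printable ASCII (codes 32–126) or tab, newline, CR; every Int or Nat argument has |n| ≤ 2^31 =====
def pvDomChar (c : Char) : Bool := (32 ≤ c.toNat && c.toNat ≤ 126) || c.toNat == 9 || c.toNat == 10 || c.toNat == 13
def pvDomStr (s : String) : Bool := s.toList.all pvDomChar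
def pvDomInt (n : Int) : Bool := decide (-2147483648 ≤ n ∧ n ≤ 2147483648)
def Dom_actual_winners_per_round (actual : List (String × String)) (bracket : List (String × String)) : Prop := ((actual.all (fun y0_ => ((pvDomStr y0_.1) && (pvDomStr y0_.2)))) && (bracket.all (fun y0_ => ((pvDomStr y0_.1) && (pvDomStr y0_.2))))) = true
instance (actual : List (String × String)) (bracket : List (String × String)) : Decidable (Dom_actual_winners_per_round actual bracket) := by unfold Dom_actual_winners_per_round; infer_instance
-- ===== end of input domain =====

-- B buckets each team once by exact furthest rank and builds the rounds back-to-front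
-- by positional merges, instead of A's six filtering re-scans; objective: alternative algorithm (same cost).

-- module-level constant shared by both Pythons
def ROUND_ORDER : PySem.Dict String Int :=
  PySem.Dict.ofList [("R64", 0), ("R32", 1), ("S16", 2), ("E8", 3), ("F4", 4), ("Championship", 5), ("Champion", 6)]

-- ===== PORT A =====
-- for round_name in [...]: winners[round_name] = [team for team, furthest in actual.items() if ROUND_ORDER.get(furthest,0) >= round_idx]
def actual_winners_per_round (actual : List (String × String)) (bracket : List (String × String)) : List (String × List String) :=
  (["R32", "S16", "E8", "F4", "Championship", "Champion"]).foldl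
    (fun winners round_name =>
      let round_idx := PySem.Dict.getD ROUND_ORDER round_name 0
      winners ++ [(round_name,
        (actual.filter (fun p => PySem.Dict.getD ROUND_ORDER p.2 0 ≥ round_idx)).map Prod.fst)])
    []

-- ===== PORT B =====
-- _merge(a, b): two-pointer merge of position-sorted lists, transcribed structurally
def pvMerge : List (Int × String) → List (Int × String) → List (Int × String)
  | [], b => b
  | a :: as_, [] => a :: as_
  | a :: as_, b :: bs => if a.1 ≤ b.1 then a :: pvMerge as_ (b :: bs) else b :: pvMerge (a :: as_) bs

-- one bucketing step: append (i, team) to the bucket of the team's exact rank (rank 0 is dropped)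
def pvBStep (st : List (Int × String) × List (Int × String) × List (Int × String) × List (Int × String) × List (Int × String) × List (Int × String))
    (x : Int × String × String) :
    List (Int × String) × List (Int × String) × List (Int × String) × List (Int × String) × List (Int × String) × List (Int × String) :=
  let r := PySem.Dict.getD ROUND_ORDER x.2.2 0
  ( (if r = 1 then st.1 ++ [(x.1, x.2.1)] else st.1),
    (if r = 2 then st.2.1 ++ [(x.1, x.2.1)] else st.2.1),
    (if r = 3 then st.2.2.1 ++ [(x.1, x.2.1)] else st.2.2.1),
    (if r = 4 then st.2.2.2.1 ++ [(x.1, x.2.1)] else st.2.2.2.1),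
    (if r = 5 then st.2.2.2.2.1 ++ [(x.1, x.2.1)] else st.2.2.2.2.1),
    (if r = 6 then st.2.2.2.2.2 ++ [(x.1, x.2.1)] else st.2.2.2.2.2) )

def actual_winners_per_round_alt (actual : List (String × String)) (bracket : List (String × String)) : List (String × List String) :=
  let bk := (PySem.List.enumerate actual 0).foldl pvBStep ([], [], [], [], [], [])
  -- for k in range(6, 0, -1): acc = _merge(buckets[k], acc); results[ROUNDS[k-1]] = [team for _, team in acc]
  let a6 := pvMerge bk.2.2.2.2.2 []
  let a5 := pvMerge bk.2.2.2.2.1 a6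
  let a4 := pvMerge bk.2.2.2.1 a5
  let a3 := pvMerge bk.2.2.1 a4
  let a2 := pvMerge bk.2.1 a3
  let a1 := pvMerge bk.1 a2
  [("R32", a1.map Prod.snd), ("S16", a2.map Prod.snd), ("E8", a3.map Prod.snd),
   ("F4", a4.map Prod.snd), ("Championship", a5.map Prod.snd), ("Champion", a6.map Prod.snd)]

-- ===== PRECONDITION & SPEC =====
def Spec_actual_winners_per_round (actual : List (String × String)) (bracket : List (String × String)) (out : List (String × List String)) : Prop := out = actual_winners_per_round_alt actual bracket
instance (actual : List (String × String)) (bracket : List (String × String)) (out : List (String × List String)) : Decidable (Spec_actual_winners_per_round actual bracket out) := by unfold Spec_actual_winners_per_round; infer_instance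

-- ===== CLAIM (what is proved, stated in full; the proofs are below) =====
def Claim_equal_actual_winners_per_round : Prop := ∀ (actual : List (String × String)) (bracket : List (String × String)), Dom_actual_winners_per_round actual bracket → Spec_actual_winners_per_round actual bracket (actual_winners_per_round actual bracket)

-- ===== LEMMAS AND PROOFS =====

def pvRank (f : String) : Int := PySem.Dict.getD ROUND_ORDER f 0

-- selection of (index, team) pairs whose rank satisfies c, from an enumerated list
lemma pvMerge_nil_right (a : List (Int × String)) : pvMerge a [] = a := by
  cases a <;> simp [pvMerge]

def pvSel (c : Int → Bool) (xs : List (Int × String × String)) : List (Int × String) :=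
  (xs.filter (fun x => c (pvRank x.2.2))).map (fun x => (x.1, x.2.1))

lemma pvRank_cases (f : String) :
    pvRank f = 0 ∨ pvRank f = 1 ∨ pvRank f = 2 ∨ pvRank f = 3 ∨ pvRank f = 4 ∨ pvRank f = 5 ∨ pvRank f = 6 := by
  have hitems : ROUND_ORDER.items = [("R64", (0:Int)), ("R32", 1), ("S16", 2), ("E8", 3), ("F4", 4), ("Championship", 5), ("Champion", 6)] := by decide
  unfold pvRank
  cases h : List.find? (fun p => p.1 == f) ROUND_ORDER.items with
  | none => simp [PySem.Dict.getD, PySem.Dict.get?, h]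
  | some p =>
    have hp := List.mem_of_find?_eq_some h
    rw [hitems] at hp
    simp only [PySem.Dict.getD, PySem.Dict.get?, h, Option.map_some, Option.getD_some]
    fin_cases hp <;> simp

lemma pvSel_mem_fst {c : Int → Bool} {xs : List (Int × String × String)} {a : Int × String}
    (h : a ∈ pvSel c xs) : ∃ y ∈ xs, a.1 = y.1 := by
  unfold pvSel at h
  simp only [List.mem_map, List.mem_filter] at h
  obtain ⟨y, ⟨hy, _⟩, rfl⟩ := h
  exact ⟨y, hy, rfl⟩

lemma pvMerge_sel (c d : Int → Bool) (hdisj : ∀ r, ¬(c r = true ∧ d r = true))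
    (xs : List (Int × String × String)) (hP : xs.Pairwise (fun a b => a.1 < b.1)) :
    pvMerge (pvSel c xs) (pvSel d xs) = pvSel (fun r => c r || d r) xs := by
  induction xs with
  | nil => simp [pvSel, pvMerge]
  | cons x xs ih =>
    have hlt : ∀ y ∈ xs, x.1 < y.1 := (List.pairwise_cons.mp hP).1
    have hPt : xs.Pairwise (fun a b => a.1 < b.1) := (List.pairwise_cons.mp hP).2
    have ih' := ih hPt
    by_cases hc : c (pvRank x.2.2) = true
    · have hd : d (pvRank x.2.2) = false := by
        by_contra h
        exact hdisj _ ⟨hc, by simpa using h⟩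
      have hsel : pvSel c (x :: xs) = (x.1, x.2.1) :: pvSel c xs := by
        simp [pvSel, List.filter_cons, hc]
      have hseld : pvSel d (x :: xs) = pvSel d xs := by
        simp [pvSel, List.filter_cons, hd]
      have hselo : pvSel (fun r => c r || d r) (x :: xs) = (x.1, x.2.1) :: pvSel (fun r => c r || d r) xs := by
        simp [pvSel, List.filter_cons, hc]
      rw [hsel, hseld, hselo, ← ih']
      cases hB : pvSel d xs with
      | nil => simp [hB, pvMerge_nil_right]
      | cons b bs =>
        have hxb : x.1 ≤ b.1 := by
          have := pvSel_mem_fst (c := d) (xs := xs) (a := b) (by rw [hB]; exact List.mem_cons_self ..)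
          obtain ⟨y, hy, he⟩ := this
          exact le_of_lt (he ▸ hlt y hy)
        simp [pvMerge, hxb]
    · by_cases hd : d (pvRank x.2.2) = true
      · have hsel : pvSel c (x :: xs) = pvSel c xs := by
          simp [pvSel, List.filter_cons, hc]
        have hseld : pvSel d (x :: xs) = (x.1, x.2.1) :: pvSel d xs := by
          simp [pvSel, List.filter_cons, hd]
        have hselo : pvSel (fun r => c r || d r) (x :: xs) = (x.1, x.2.1) :: pvSel (fun r => c r || d r) xs := by
          simp [pvSel, List.filter_cons, hc, hd]
        rw [hsel, hseld, hselo, ← ih']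
        cases hA : pvSel c xs with
        | nil => simp [pvMerge]
        | cons a as_ =>
          have hxa : ¬ a.1 ≤ x.1 := by
            have := pvSel_mem_fst (c := c) (xs := xs) (a := a) (by rw [hA]; exact List.mem_cons_self ..)
            obtain ⟨y, hy, he⟩ := this
            have := hlt y hy
            omega
          simp [pvMerge, hxa]
      · have hsel : pvSel c (x :: xs) = pvSel c xs := by
          simp [pvSel, List.filter_cons, hc]
        have hseld : pvSel d (x :: xs) = pvSel d xs := by
          simp [pvSel, List.filter_cons, hd]
        have hselo : pvSel (fun r => c r || d r) (x :: xs) = pvSel (fun r => c r || d r) xs := by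
          simp [pvSel, List.filter_cons, hc, hd]
        rw [hsel, hseld, hselo, ih']

-- the bucketing fold computes the six exact-rank selections
lemma pvBucket_fold (xs : List (Int × String × String))
    (t1 t2 t3 t4 t5 t6 : List (Int × String)) :
    xs.foldl pvBStep (t1, t2, t3, t4, t5, t6) =
      (t1 ++ pvSel (fun r => r == 1) xs, t2 ++ pvSel (fun r => r == 2) xs,
       t3 ++ pvSel (fun r => r == 3) xs, t4 ++ pvSel (fun r => r == 4) xs,
       t5 ++ pvSel (fun r => r == 5) xs, t6 ++ pvSel (fun r => r == 6) xs) := by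
  induction xs generalizing t1 t2 t3 t4 t5 t6 with
  | nil => simp [pvSel]
  | cons x xs ih =>
    rw [List.foldl_cons, pvBStep, ih]
    have hsel : ∀ k : Int,
        pvSel (fun r => r == k) (x :: xs) =
          (if pvRank x.2.2 = k then [(x.1, x.2.1)] else []) ++ pvSel (fun r => r == k) xs := by
      intro k
      by_cases h : pvRank x.2.2 = k <;> simp [pvSel, List.filter_cons, h]
    simp only [hsel, pvRank]
    by_cases h1 : PySem.Dict.getD ROUND_ORDER x.2.2 0 = 1 <;>
    by_cases h2 : PySem.Dict.getD ROUND_ORDER x.2.2 0 = 2 <;>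
    by_cases h3 : PySem.Dict.getD ROUND_ORDER x.2.2 0 = 3 <;>
    by_cases h4 : PySem.Dict.getD ROUND_ORDER x.2.2 0 = 4 <;>
    by_cases h5 : PySem.Dict.getD ROUND_ORDER x.2.2 0 = 5 <;>
    by_cases h6 : PySem.Dict.getD ROUND_ORDER x.2.2 0 = 6 <;>
      simp [h1, h2, h3, h4, h5, h6]

-- a selection's teams are exactly A's filtered team list (rank-threshold form)
lemma pvSel_map_snd (c : Int → Bool) (xs : List (String × String)) (n : Int) :
    (pvSel c (PySem.List.enumerate xs n)).map Prod.snd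
      = (xs.filter (fun p => c (pvRank p.2))).map Prod.fst := by
  induction xs generalizing n with
  | nil => simp [pvSel, PySem.List.enumerate]
  | cons x xs ih =>
    rw [PySem.List.enumerate_cons]
    by_cases h : c (pvRank x.2) = true <;>
      simp [pvSel, List.filter_cons, h, ← ih (n + 1), pvSel]

lemma pvSel_congr (c d : Int → Bool) (h : ∀ r, r = 0 ∨ r = 1 ∨ r = 2 ∨ r = 3 ∨ r = 4 ∨ r = 5 ∨ r = 6 → c r = d r)
    (xs : List (Int × String × String)) : pvSel c xs = pvSel d xs := by
  unfold pvSel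
  congr 1
  apply List.filter_congr
  intro x _
  exact h _ (pvRank_cases x.2.2)

-- ===== VERDICT (by name: the statement is the Claim_ definition above) =====
theorem actual_winners_per_round_spec : Claim_equal_actual_winners_per_round := by
  intro actual bracket _
  show _ = _
  rw [actual_winners_per_round, actual_winners_per_round_alt]
  simp only [List.foldl_cons, List.foldl_nil, List.nil_append]
  rw [pvBucket_fold]
  simp only [List.nil_append]
  set e := PySem.List.enumerate actual 0 with he
  have hP : e.Pairwise (fun a b => a.1 < b.1) := PySem.List.pairwise_lt_enumerate actual 0
  have m6 := pvMerge_nil_right (pvSel (fun r => r == 6) e)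
  have m5 := pvMerge_sel (fun r => r == 5) (fun r => r == 6) (by intro r; simp; omega) e hP
  have c5 : pvSel (fun r => (r == 5) || (r == 6)) e = pvSel (fun r => 5 ≤ r) e :=
    pvSel_congr _ _ (by intro r hr; rcases hr with h|h|h|h|h|h|h <;> subst h <;> decide) e
  have m4 := pvMerge_sel (fun r => r == 4) (fun r => 5 ≤ r) (by intro r; simp; omega) e hP
  have c4 : pvSel (fun r => (r == 4) || (5 ≤ r)) e = pvSel (fun r => 4 ≤ r) e :=
    pvSel_congr _ _ (by intro r hr; rcases hr with h|h|h|h|h|h|h <;> subst h <;> decide) e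
  have m3 := pvMerge_sel (fun r => r == 3) (fun r => 4 ≤ r) (by intro r; simp; omega) e hP
  have c3 : pvSel (fun r => (r == 3) || (4 ≤ r)) e = pvSel (fun r => 3 ≤ r) e :=
    pvSel_congr _ _ (by intro r hr; rcases hr with h|h|h|h|h|h|h <;> subst h <;> decide) e
  have m2 := pvMerge_sel (fun r => r == 2) (fun r => 3 ≤ r) (by intro r; simp; omega) e hP
  have c2 : pvSel (fun r => (r == 2) || (3 ≤ r)) e = pvSel (fun r => 2 ≤ r) e :=
    pvSel_congr _ _ (by intro r hr; rcases hr with h|h|h|h|h|h|h <;> subst h <;> decide) e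
  have m1 := pvMerge_sel (fun r => r == 1) (fun r => 2 ≤ r) (by intro r; simp; omega) e hP
  have c1 : pvSel (fun r => (r == 1) || (2 ≤ r)) e = pvSel (fun r => 1 ≤ r) e :=
    pvSel_congr _ _ (by intro r hr; rcases hr with h|h|h|h|h|h|h <;> subst h <;> decide) e
  have c6 : pvSel (fun r => r == 6) e = pvSel (fun r => 6 ≤ r) e :=
    pvSel_congr _ _ (by intro r hr; rcases hr with h|h|h|h|h|h|h <;> subst h <;> decide) e
  rw [m6, m5, c5, m4, c4, m3, c3, m2, c2, m1, c1, c6]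
  have hth : ∀ k : Int, (pvSel (fun r => k ≤ r) e).map Prod.snd
      = (actual.filter (fun p => k ≤ pvRank p.2)).map Prod.fst := by
    intro k
    rw [he, pvSel_map_snd (fun r => decide (k ≤ r)) actual 0]
  have h1 : PySem.Dict.getD ROUND_ORDER "R32" 0 = 1 := by decide
  have h2 : PySem.Dict.getD ROUND_ORDER "S16" 0 = 2 := by decide
  have h3 : PySem.Dict.getD ROUND_ORDER "E8" 0 = 3 := by decide
  have h4 : PySem.Dict.getD ROUND_ORDER "F4" 0 = 4 := by decide
  have h5 : PySem.Dict.getD ROUND_ORDER "Championship" 0 = 5 := by decide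
  have h6 : PySem.Dict.getD ROUND_ORDER "Champion" 0 = 6 := by decide
  simp only [h1, h2, h3, h4, h5, h6, hth, ge_iff_le, pvRank]
  simp
  exact ⟨rfl, rfl, rfl, rfl, rfl, rfl⟩
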